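-- pv_equiv track=rewrite | github.com/sujinjeongg/Baekjoon | 백준/Bronze/25501. 재귀의 귀재/재귀의 귀재.py | solution
-- ===== SOURCE A (Python) =====
-- def solution(T, S):
--     cnt = [0]
--
--     def recursion(s, l, r):
--         cnt[0] += 1
--         if l>=r: return 1
--         elif s[l] != s[r]: return 0
--         else: return recursion(s, l+1, r-1)
--
--     def isPalindrome(s):
--         return recursion(s, 0, len(s)-1)
--
--     output = []
--     for i in range(T):
--         cnt[0] = 0
--         output.append((isPalindrome(S[i]), cnt[0]))
--
--     return output
-- ===== SOURCE B (Python) =====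
-- def judge(s):
--     h = len(s) // 2
--     for k, (a, b) in enumerate(zip(s[:h], reversed(s))):
--         if a != b:
--             return (0, k + 1)
--     return (1, h + 1)
--
--
-- def solution(T, S):
--     return [judge(S[i]) for i in range(T)]
-- ===== Notes on version B (the rewrite author's own statement) =====
-- stated objective: idiomatic
-- what changed: Replaced the tail-recursive two-index helper with a mutable counter cell by zipping the first half of the string against its reversal and scanning that pair list for the first mismatch, recovering the call count as k+1 at the mismatch or h+1 for a palindrome.
import Mathlib
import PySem

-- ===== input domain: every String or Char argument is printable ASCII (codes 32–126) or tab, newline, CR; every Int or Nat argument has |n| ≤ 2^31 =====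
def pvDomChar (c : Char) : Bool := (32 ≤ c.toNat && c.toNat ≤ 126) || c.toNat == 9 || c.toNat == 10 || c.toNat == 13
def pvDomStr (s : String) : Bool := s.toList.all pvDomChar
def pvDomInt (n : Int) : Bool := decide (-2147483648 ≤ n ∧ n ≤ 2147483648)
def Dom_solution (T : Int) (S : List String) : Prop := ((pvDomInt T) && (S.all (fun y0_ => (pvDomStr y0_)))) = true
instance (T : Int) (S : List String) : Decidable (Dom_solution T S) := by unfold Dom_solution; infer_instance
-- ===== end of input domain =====

-- B replaces the recursive two-index helper + counter cell by a zip of the first half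
-- against the reversed string scanned for the first mismatch (idiomatic).

-- ===== PORT A =====
-- recursion(s, l, r) with the cnt cell threaded as state; returns (result, cnt).
-- s[l]/s[r] via pyGet?: within Pre_ the accessed indices are always in range (exact there).
def pvRecA (cs : List Char) (l r cnt : Int) : Int × Int :=
  let cnt := cnt + 1
  if l ≥ r then (1, cnt)
  else if PySem.Chars.pyGet? cs l ≠ PySem.Chars.pyGet? cs r then (0, cnt)
  else pvRecA cs (l + 1) (r - 1) cnt
termination_by (r - l).toNat
decreasing_by omega

def solution (T : Int) (S : List String) : List (Int × Int) :=
  (PySem.List.pyRange 0 T 1).foldl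
    (fun output i =>
      -- cnt[0] = 0; output.append((isPalindrome(S[i]), cnt[0]))
      output ++ [pvRecA (PySem.List.pyGetD S i "").toList 0
        (PySem.Str.len (PySem.List.pyGetD S i "") - 1) 0])
    []

-- ===== PORT B =====
-- the 'for k, (a, b) in enumerate(zip(...))' loop with its two early returns
def pvFind (ps : List (Char × Char)) (k h : Int) : Int × Int :=
  match ps with
  | [] => (1, h + 1)
  | (a, b) :: rest => if a ≠ b then (0, k + 1) else pvFind rest (k + 1) h

-- judge(s): zip the first half s[:h] against reversed(s) and scan for a mismatch
def pvJudge (s : String) : Int × Int :=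
  let cs := s.toList
  let h : Int := PySem.Int.floordiv (cs.length : Int) 2
  pvFind (List.zip (PySem.List.slice cs none (some h)) cs.reverse) 0 h

def solution_alt (T : Int) (S : List String) : List (Int × Int) :=
  (PySem.List.pyRange 0 T 1).map (fun i => pvJudge (PySem.List.pyGetD S i ""))

-- ===== PRECONDITION & SPEC =====
-- A evaluates S[i] for i in range(T): an IndexError (T > len(S)) is excluded; B raises there too.
def Pre_solution (T : Int) (S : List String) : Prop := T ≤ (S.length : Int)
instance (T : Int) (S : List String) : Decidable (Pre_solution T S) := by unfold Pre_solution; infer_instance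
def pvWitness_solution : Int × List String := (2, ["aba", "abca"])
def Spec_solution (T : Int) (S : List String) (out : List (Int × Int)) : Prop := out = solution_alt T S
instance (T : Int) (S : List String) (out : List (Int × Int)) : Decidable (Spec_solution T S out) := by unfold Spec_solution; infer_instance

-- ===== CLAIM (what is proved, stated in full; the proofs are below) =====
def Claim_equal_solution : Prop := ∀ (T : Int) (S : List String), Dom_solution T S → Pre_solution T S → Spec_solution T S (solution T S)

-- ===== LEMMAS AND PROOFS =====

-- Core: A's recursion from (k, n-1-k) with count k equals B's scan of the pair list from index k.
theorem pvRecA_eq_pvFind (cs : List Char) :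
    ∀ k : Nat, k ≤ cs.length / 2 →
      pvRecA cs (k : Int) ((cs.length : Int) - 1 - k) (k : Int)
        = pvFind (((cs.take (cs.length / 2)).zip cs.reverse).drop k) (k : Int)
            ((cs.length : Int) / 2) := by
  intro k
  induction hm : cs.length / 2 - k generalizing k with
  | zero =>
    intro hk
    have hkeq : k = cs.length / 2 := by omega
    rw [pvRecA]
    have hstop : (k : Int) ≥ (cs.length : Int) - 1 - k := by
      subst hkeq; omega
    rw [if_pos hstop]
    have hlen : ((cs.take (cs.length / 2)).zip cs.reverse).length = cs.length / 2 := by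
      simp [List.length_zip]; omega
    rw [List.drop_eq_nil_of_le (by omega), pvFind]
    subst hkeq
    simp
  | succ m ih =>
    intro hk
    have hklt : k < cs.length / 2 := by omega
    have hlen2 : 2 ≤ cs.length := by omega
    rw [pvRecA]
    have hnstop : ¬ ((k : Int) ≥ (cs.length : Int) - 1 - k) := by omega
    rw [if_neg hnstop]
    -- the pair list has the k-th element (cs[k], cs[len-1-k])
    have hlenz : ((cs.take (cs.length / 2)).zip cs.reverse).length = cs.length / 2 := by
      simp [List.length_zip]; omega
    have hkz : k < ((cs.take (cs.length / 2)).zip cs.reverse).length := by omega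
    rw [List.drop_eq_getElem_cons hkz, pvFind]
    have hgz : ((cs.take (cs.length / 2)).zip cs.reverse)[k] =
        (cs[k]'(by omega), cs[cs.length - 1 - k]'(by omega)) := by
      simp [List.getElem_zip, List.getElem_take, List.getElem_reverse]
    rw [hgz]
    have hg1 : PySem.Chars.pyGet? cs (k : Int) = some (cs[k]'(by omega)) := by
      simp [PySem.List.pyGet?_natCast]
    have hg2 : PySem.Chars.pyGet? cs ((cs.length : Int) - 1 - k)
        = some (cs[cs.length - 1 - k]'(by omega)) := by
      have : ((cs.length : Int) - 1 - k) = ((cs.length - 1 - k : Nat) : Int) := by omega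
      rw [this]
      simp [PySem.List.pyGet?_natCast, List.getElem?_eq_getElem (by omega : cs.length - 1 - k < cs.length)]
    rw [hg1, hg2]
    by_cases heq : cs[k]'(by omega) = cs[cs.length - 1 - k]'(by omega)
    · have hsome : ¬ (some (cs[k]'(by omega)) ≠ some (cs[cs.length - 1 - k]'(by omega))) := by
        simp [heq]
      rw [if_neg hsome, if_neg (by simp [heq])]
      have harg : (cs.length : Int) - 1 - k - 1 = (cs.length : Int) - 1 - (k + 1 : Nat) := by
        push_cast; ring
      have hcast : (k : Int) + 1 = ((k + 1 : Nat) : Int) := by push_cast; ring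
      rw [harg, hcast]
      exact ih (k + 1) (by omega) (by omega)
    · rw [if_pos (by simp [heq]), if_pos (by simp [heq])]

theorem per_string (s : String) :
    pvRecA s.toList 0 ((s.toList.length : Int) - 1) 0 = pvJudge s := by
  unfold pvJudge
  have hfd : PySem.Int.floordiv (s.toList.length : Int) 2 = (s.toList.length : Int) / 2 :=
    PySem.Int.floordiv_eq_ediv_of_pos (by omega)
  have hsl : PySem.List.slice s.toList none
      (some ((s.toList.length : Int) / 2)) = s.toList.take (s.toList.length / 2) := by
    rw [PySem.List.slice_to _ (by omega)]
    congr 1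
  have h := pvRecA_eq_pvFind s.toList 0 (by omega)
  simp only [Nat.cast_zero, sub_zero, List.drop_zero] at h
  simp only [hfd, hsl]
  exact h

theorem foldl_append_singleton {α β : Type} (g : α → β) :
    ∀ (l : List α) (acc : List β),
      l.foldl (fun o i => o ++ [g i]) acc = acc ++ l.map g := by
  intro l
  induction l with
  | nil => intro acc; simp
  | cons x xs ih => intro acc; simp [ih, List.append_assoc]

-- ===== VERDICT (by name: the statement is the Claim_ definition above) =====
theorem solution_spec : Claim_equal_solution := by
  intro T S _ _
  unfold Spec_solution solution solution_alt
  rw [foldl_append_singleton]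
  simp only [List.nil_append]
  apply List.map_congr_left
  intro i _
  rw [← per_string]
  simp [PySem.Str.len_eq]
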